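-- pv_equiv track=rewrite | github.com/JeanArdila711/Parcial-1---Datos-2 | Itinerario/main.py | construir_grafo
-- ===== SOURCE A (Python) =====
-- def construir_grafo(coordenadas, distancias, intermedios):
--     grafo = {}
--     lugares = list(coordenadas.keys())
--
--     for origen in lugares:
--         grafo[origen] = {}
--         for destino in lugares:
--             if origen != destino:
--                 distancia = distancias.get((origen, destino))
--                 if distancia:
--                     grafo[origen][destino] = distancia
--
--     # Agregar las distancias entre lugares intermedios
--     for i in range(len(intermedios)):
--         for j in range(i+1, len(intermedios)):
--             origen = intermedios[i]
--             destino = intermedios[j]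
--             distancia = distancias.get((origen, destino))
--             if distancia:
--                 grafo[origen][destino] = distancia
--                 grafo[destino][origen] = distancia
--
--     return grafo
-- ===== SOURCE B (Python) =====
-- def construir_grafo(coordenadas, distancias, intermedios):
--     # Index qualifying edges by destination in one pass, then sweep destinations
--     # in node order: O(V + E) instead of A's O(V^2) nested scan.
--     lugares = set(coordenadas)
--     preds = {}
--     for (origen, destino), distancia in distancias.items():
--         if distancia and origen != destino and origen in lugares and destino in lugares:
--             preds.setdefault(destino, []).append((origen, distancia))
--     grafo = {origen: {} for origen in coordenadas}
--     for destino in coordenadas: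
--         for origen, distancia in preds.get(destino, ()):
--             grafo[origen][destino] = distancia
--     # distances between intermediate places
--     for i in range(len(intermedios)):
--         for j in range(i + 1, len(intermedios)):
--             origen = intermedios[i]
--             destino = intermedios[j]
--             distancia = distancias.get((origen, destino))
--             if distancia:
--                 grafo[origen][destino] = distancia
--                 grafo[destino][origen] = distancia
--     return grafo
-- ===== Notes on version B (the rewrite author's own statement) =====
-- stated objective: faster
-- what changed: A fills each node's adjacency row by scanning all node pairs (O(V^2) .get probes); B makes one pass over distancias.items() grouping qualifying edges by destination, then a single sweep over the nodes in order distributes them into the rows, keeping identical dict insertion order.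
import Mathlib
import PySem

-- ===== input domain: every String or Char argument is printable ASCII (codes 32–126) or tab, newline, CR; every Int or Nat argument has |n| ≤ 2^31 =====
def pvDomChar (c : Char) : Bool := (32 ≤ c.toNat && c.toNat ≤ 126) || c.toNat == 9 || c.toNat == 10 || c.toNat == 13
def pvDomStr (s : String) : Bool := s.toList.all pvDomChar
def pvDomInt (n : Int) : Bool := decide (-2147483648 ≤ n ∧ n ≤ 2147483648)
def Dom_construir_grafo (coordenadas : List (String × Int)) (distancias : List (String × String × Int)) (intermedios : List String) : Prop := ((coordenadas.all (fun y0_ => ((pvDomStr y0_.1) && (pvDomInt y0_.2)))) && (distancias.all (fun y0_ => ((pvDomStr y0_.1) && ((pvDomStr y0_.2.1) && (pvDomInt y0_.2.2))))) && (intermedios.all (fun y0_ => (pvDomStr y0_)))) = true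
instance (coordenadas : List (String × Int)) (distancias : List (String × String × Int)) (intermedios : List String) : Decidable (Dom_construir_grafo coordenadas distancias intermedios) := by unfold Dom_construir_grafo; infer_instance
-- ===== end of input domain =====

-- B builds the adjacency rows from one pass over distancias grouped by destination plus a
-- single ordered sweep of the nodes, instead of A's all-pairs nested scan; equal return value.

-- ===== PORT A =====
-- both Pythons receive 'distancias' as a dict keyed by (origen, destino): rebuild it
def pvDictD (distancias : List (String × String × Int)) : PySem.Dict (String × String) Int :=
  PySem.Dict.ofList (distancias.map (fun t => ((t.1, t.2.1), t.2.2)))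

-- second loop, textually identical in both Pythons: distances between intermediate places
def pvFase2 (D : PySem.Dict (String × String) Int) (intermedios : List String)
    (grafo : PySem.Dict String (PySem.Dict String Int)) : PySem.Dict String (PySem.Dict String Int) :=
  (PySem.List.pyRange 0 intermedios.length 1).foldl (fun g i =>
    (PySem.List.pyRange (i+1) intermedios.length 1).foldl (fun g j =>
      let origen := PySem.List.pyGetD intermedios i ""
      let destino := PySem.List.pyGetD intermedios j ""
      match D.get? (origen, destino) with
      | some distancia =>
          if distancia ≠ 0 then
            (g.modify origen PySem.Dict.empty (fun row => row.insert destino distancia)).modify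
              destino PySem.Dict.empty (fun row => row.insert origen distancia)
          else g
      | none => g) g) grafo

def construir_grafo (coordenadas : List (String × Int)) (distancias : List (String × String × Int)) (intermedios : List String) : List (String × List (String × Int)) :=
  let D := pvDictD distancias
  let lugares := (PySem.Dict.ofList coordenadas).keys
  let grafo := lugares.foldl (fun g origen =>
      lugares.foldl (fun g destino =>
        if origen ≠ destino then
          match D.get? (origen, destino) with
          | some distancia =>
              if distancia ≠ 0 then g.modify origen PySem.Dict.empty (fun row => row.insert destino distancia) else g
          | none => g
        else g) (g.insert origen PySem.Dict.empty)) PySem.Dict.empty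
  let grafo := pvFase2 D intermedios grafo
  grafo.items.map (fun p => (p.1, p.2.items))

-- ===== PORT B =====
def construir_grafo_alt (coordenadas : List (String × Int)) (distancias : List (String × String × Int)) (intermedios : List String) : List (String × List (String × Int)) :=
  let D := pvDictD distancias
  let lugares : PySem.Set String := PySem.Set.ofList (PySem.Dict.ofList coordenadas).keys
  let preds := D.items.foldl (fun p t =>
      if t.2 ≠ 0 ∧ t.1.1 ≠ t.1.2 ∧ PySem.Set.contains lugares t.1.1 = true ∧ PySem.Set.contains lugares t.1.2 = true then
        p.modify t.1.2 [] (fun l => l ++ [(t.1.1, t.2)])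
      else p) PySem.Dict.empty
  let grafo := (PySem.Dict.ofList coordenadas).keys.foldl
      (fun g origen => g.insert origen PySem.Dict.empty) PySem.Dict.empty
  let grafo := (PySem.Dict.ofList coordenadas).keys.foldl (fun g destino =>
      (preds.getD destino []).foldl (fun g q =>
        g.modify q.1 PySem.Dict.empty (fun row => row.insert destino q.2)) g) grafo
  let grafo := pvFase2 D intermedios grafo
  grafo.items.map (fun p => (p.1, p.2.items))

-- ===== PRECONDITION & SPEC =====
-- Pre_ excludes exactly the inputs where the Python A raises KeyError: some pair i < j of
-- intermedios carries a nonzero stored distance while an endpoint is not a key of coordenadas.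
def Pre_construir_grafo (coordenadas : List (String × Int)) (distancias : List (String × String × Int)) (intermedios : List String) : Prop :=
  ((List.range intermedios.length).all (fun j => (List.range j).all (fun i =>
    (pvDictD distancias).getD (intermedios[i]!, intermedios[j]!) 0 == 0 ||
    ((PySem.Dict.ofList coordenadas).keys.contains intermedios[i]! &&
     (PySem.Dict.ofList coordenadas).keys.contains intermedios[j]!)))) = true
instance (coordenadas : List (String × Int)) (distancias : List (String × String × Int)) (intermedios : List String) : Decidable (Pre_construir_grafo coordenadas distancias intermedios) := by unfold Pre_construir_grafo; infer_instance

def pvWitness_construir_grafo : (List (String × Int)) × (List (String × String × Int)) × List String :=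
  ([("a", 1), ("b", 2)], [("a", "b", 5)], ["a", "b"])

def Spec_construir_grafo (coordenadas : List (String × Int)) (distancias : List (String × String × Int)) (intermedios : List String) (out : List (String × List (String × Int))) : Prop := out = construir_grafo_alt coordenadas distancias intermedios
instance (coordenadas : List (String × Int)) (distancias : List (String × String × Int)) (intermedios : List String) (out : List (String × List (String × Int))) : Decidable (Spec_construir_grafo coordenadas distancias intermedios out) := by unfold Spec_construir_grafo; infer_instance

-- ===== CLAIM (what is proved, stated in full; the proofs are below) =====
def Claim_equal_construir_grafo : Prop := ∀ (coordenadas : List (String × Int)) (distancias : List (String × String × Int)) (intermedios : List String), Dom_construir_grafo coordenadas distancias intermedios → Pre_construir_grafo coordenadas distancias intermedios → Spec_construir_grafo coordenadas distancias intermedios (construir_grafo coordenadas distancias intermedios)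

-- ===== LEMMAS AND PROOFS =====

-- A's inner per-origin loop, collapsed into the row it builds
def pvRowA (D : PySem.Dict (String × String) Int) (ks : List String) (o : String) : PySem.Dict String Int :=
  ks.foldl (fun r destino =>
    if o ≠ destino then
      match D.get? (o, destino) with
      | some distancia => if distancia ≠ 0 then r.insert destino distancia else r
      | none => r
    else r) PySem.Dict.empty

theorem pv_inner_collapse (D : PySem.Dict (String × String) Int) (o : String) (l : List String)
    (g : PySem.Dict String (PySem.Dict String Int)) (r : PySem.Dict String Int) :
    l.foldl (fun g destino =>
      if o ≠ destino then
        match D.get? (o, destino) with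
        | some distancia =>
            if distancia ≠ 0 then g.modify o PySem.Dict.empty (fun row => row.insert destino distancia) else g
        | none => g
      else g) (g.insert o r)
    = g.insert o (l.foldl (fun r destino =>
        if o ≠ destino then
          match D.get? (o, destino) with
          | some distancia => if distancia ≠ 0 then r.insert destino distancia else r
          | none => r
        else r) r) := by
  induction l generalizing r with
  | nil => rfl
  | cons dest t ih =>
    simp only [List.foldl_cons]
    by_cases hod : o ≠ dest
    · simp only [if_pos hod]
      cases hget : D.get? (o, dest) with
      | none => exact ih r
      | some v =>
        by_cases hv : v ≠ 0
        · simp only [if_pos hv]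
          have hmod : (g.insert o r).modify o PySem.Dict.empty (fun row => row.insert dest v)
              = g.insert o (r.insert dest v) := by
            simp only [PySem.Dict.modify, PySem.Dict.getD_insert_self, PySem.Dict.insert_insert_self]
          rw [hmod]
          exact ih _
        · simp only [if_neg hv]; exact ih r
    · simp only [if_neg hod]; exact ih r

-- A's phase 1 is an insertion of complete rows
theorem pv_phase1A (D : PySem.Dict (String × String) Int) (ks : List String) :
    ks.foldl (fun g origen =>
      ks.foldl (fun g destino =>
        if origen ≠ destino then
          match D.get? (origen, destino) with
          | some distancia =>
              if distancia ≠ 0 then g.modify origen PySem.Dict.empty (fun row => row.insert destino distancia) else g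
          | none => g
        else g) (g.insert origen PySem.Dict.empty)) PySem.Dict.empty
    = ks.foldl (fun g o => g.insert o (pvRowA D ks o)) PySem.Dict.empty := by
  apply PySem.List.foldl_congr_mem
  intro g o _
  exact pv_inner_collapse D o ks g PySem.Dict.empty

theorem pv_items_rows (ks : List String) (hks : ks.Nodup) (row : String → PySem.Dict String Int) :
    (ks.foldl (fun g o => g.insert o (row o)) PySem.Dict.empty).items
      = ks.map (fun o => (o, row o)) := by
  rw [PySem.Dict.items_foldl_insert_fresh (l := ks) (d := PySem.Dict.empty) (k := fun o => o)
    (v := row) (fun a _ => PySem.Dict.contains_empty a) (by simpa using hks)]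
  simp [PySem.Dict.empty]

-- modifying one existing row keeps the row-map shape
theorem pv_items_modify (ks : List String) (hks : ks.Nodup) (g : PySem.Dict String (PySem.Dict String Int))
    (f : String → PySem.Dict String Int) (k : String) (hk : k ∈ ks)
    (u : PySem.Dict String Int → PySem.Dict String Int)
    (hg : g.items = ks.map (fun o => (o, f o))) :
    (g.modify k PySem.Dict.empty u).items = ks.map (fun o => (o, if k = o then u (f o) else f o)) := by
  have hkeys : g.keys = ks := by simp [PySem.Dict.keys, hg, Function.comp_def]
  have hnd : g.keys.Nodup := by rw [hkeys]; exact hks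
  have hmem : (k, f k) ∈ g.items := by
    rw [hg]; exact List.mem_map_of_mem hk
  have hget : g.getD k PySem.Dict.empty = f k := PySem.Dict.getD_of_mem_items g hmem hnd PySem.Dict.empty
  have hcon : g.contains k = true := by
    rw [PySem.Dict.contains_iff_mem_keys, hkeys]; exact hk
  rw [PySem.Dict.modify, hget, PySem.Dict.items_insert_of_contains g _ hcon, hg, List.map_map]
  apply List.map_congr_left
  intro o _
  by_cases h : k = o
  · subst h; simp
  · simp [Function.comp, Ne.symm h, h]

-- one destination sweep, projected to each row
theorem pv_sweep_one (ks : List String) (hks : ks.Nodup) (d : String) (L : List (String × Int))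
    (hL : ∀ q ∈ L, q.1 ∈ ks) :
    ∀ (g : PySem.Dict String (PySem.Dict String Int)) (f : String → PySem.Dict String Int),
    g.items = ks.map (fun o => (o, f o)) →
    (L.foldl (fun g q => g.modify q.1 PySem.Dict.empty (fun row => row.insert d q.2)) g).items
      = ks.map (fun o => (o, L.foldl (fun r q => if q.1 = o then r.insert d q.2 else r) (f o))) := by
  revert hL
  induction L with
  | nil => intro _ g f hg; simpa using hg
  | cons q t ih =>
    intro hL g f hg
    simp only [List.foldl_cons]
    have hq : q.1 ∈ ks := hL q (List.mem_cons_self)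
    have h1 := pv_items_modify ks hks g f q.1 hq (fun row => row.insert d q.2) hg
    exact ih (fun q' hq' => hL q' (List.mem_cons_of_mem q hq')) _
      (fun o => if q.1 = o then (f o).insert d q.2 else f o) h1

-- the whole sweep, projected to each row
theorem pv_sweep (ks : List String) (hks : ks.Nodup) (E : String → List (String × Int))
    (ds : List String) (hE : ∀ d ∈ ds, ∀ q ∈ E d, q.1 ∈ ks) :
    ∀ (g : PySem.Dict String (PySem.Dict String Int)) (f : String → PySem.Dict String Int),
    g.items = ks.map (fun o => (o, f o)) →
    (ds.foldl (fun g destino =>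
        (E destino).foldl (fun g q =>
          g.modify q.1 PySem.Dict.empty (fun row => row.insert destino q.2)) g) g).items
      = ks.map (fun o => (o, ds.foldl (fun r destino =>
          (E destino).foldl (fun r q => if q.1 = o then r.insert destino q.2 else r) r) (f o))) := by
  revert hE
  induction ds with
  | nil => intro _ g f hg; simpa using hg
  | cons d t ih =>
    intro hE g f hg
    simp only [List.foldl_cons]
    have h1 := pv_sweep_one ks hks d (E d) (hE d (List.mem_cons_self)) g f hg
    exact ih (fun d' hd' => hE d' (List.mem_cons_of_mem d hd')) _ _ h1

-- closed form of B's grouping dict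
theorem pv_preds_getD (D : PySem.Dict (String × String) Int) (lug : PySem.Set String) (d : String) :
    (D.items.foldl (fun p t =>
        if t.2 ≠ 0 ∧ t.1.1 ≠ t.1.2 ∧ PySem.Set.contains lug t.1.1 = true ∧ PySem.Set.contains lug t.1.2 = true then
          p.modify t.1.2 [] (fun l => l ++ [(t.1.1, t.2)])
        else p) PySem.Dict.empty).getD d []
    = ((D.items.filter (fun t => decide (t.2 ≠ 0 ∧ t.1.1 ≠ t.1.2 ∧ PySem.Set.contains lug t.1.1 = true ∧ PySem.Set.contains lug t.1.2 = true))).filter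
        (fun t => t.1.2 == d)).map (fun t => (t.1.1, t.2)) := by
  rw [PySem.List.foldl_ite_eq_foldl_filter]
  rw [show (D.items.filter (fun t => decide (t.2 ≠ 0 ∧ t.1.1 ≠ t.1.2 ∧ PySem.Set.contains lug t.1.1 = true ∧ PySem.Set.contains lug t.1.2 = true))).foldl
        (fun p t => p.modify t.1.2 [] (fun l => l ++ [(t.1.1, t.2)])) PySem.Dict.empty
      = ((D.items.filter (fun t => decide (t.2 ≠ 0 ∧ t.1.1 ≠ t.1.2 ∧ PySem.Set.contains lug t.1.1 = true ∧ PySem.Set.contains lug t.1.2 = true))).map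
          (fun t => (t.1.2, (t.1.1, t.2)))).foldl (fun p q => p.modify q.1 [] (fun l => l ++ [q.2])) PySem.Dict.empty
    from by rw [List.foldl_map]]
  rw [PySem.Dict.getD_foldl_modify_append]
  simp [PySem.Dict.getD_empty, List.filter_map, List.map_map, Function.comp_def]

-- skipping fold: no entry aims at row o
theorem pv_fold_skip (o d : String) (L : List (String × Int)) (h : ∀ q ∈ L, q.1 ≠ o) (r : PySem.Dict String Int) :
    L.foldl (fun r q => if q.1 = o then r.insert d q.2 else r) r = r := by
  calc L.foldl (fun r q => if q.1 = o then r.insert d q.2 else r) r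
      = L.foldl (fun a _ => a) r :=
        PySem.List.foldl_congr_mem L _ _ r (fun acc x hx => if_neg (h x hx))
    _ = r := List.foldl_fixed L

-- distributing the (at most one, by key-uniqueness) matching edge into row o
theorem pv_fold_unique (l : List ((String × String) × Int)) (hnd : (l.map Prod.fst).Nodup)
    (o d : String) (P : ((String × String) × Int) → Bool) (hP : ∀ t, P t = true → t.1.2 = d)
    (r : PySem.Dict String Int) :
    ((l.filter P).map (fun t => (t.1.1, t.2))).foldl (fun r q => if q.1 = o then r.insert d q.2 else r) r
    = match l.find? (fun t => t.1 == (o, d)) with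
      | some t => if P t ∧ t.1.1 = o then r.insert d t.2 else r
      | none => r := by
  induction l generalizing r with
  | nil => rfl
  | cons t l ih =>
    rw [List.map_cons] at hnd
    have hnotin := (List.nodup_cons.mp hnd).1
    have hnd2 := (List.nodup_cons.mp hnd).2
    by_cases hf : t.1 = (o, d)
    · have hbeq : (t.1 == (o, d)) = true := by simp [hf]
      simp only [List.find?_cons, hbeq]
      have hskip : ∀ q ∈ (l.filter P).map (fun t => (t.1.1, t.2)), q.1 ≠ o := by
        intro q hq
        obtain ⟨t', ht', rfl⟩ := List.mem_map.mp hq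
        intro ho'
        have hkey : t'.1 = (o, d) :=
          Prod.ext_iff.mpr ⟨ho', hP t' (List.mem_filter.mp ht').2⟩
        exact hnotin (by
          rw [hf, ← hkey]
          exact List.mem_map_of_mem (List.mem_filter.mp ht').1)
      cases hp : P t with
      | true =>
        simp only [List.filter_cons, hp, if_pos, List.map_cons, List.foldl_cons]
        by_cases h11 : t.1.1 = o
        · rw [if_pos h11, pv_fold_skip o d _ hskip]
          simp [h11]
        · rw [if_neg h11, pv_fold_skip o d _ hskip]
          simp [h11]
      | false =>
        have hfilter : List.filter P (t :: l) = List.filter P l := by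
          simp [hp]
        rw [hfilter, pv_fold_skip o d _ hskip]
        simp
    · have hbeq : (t.1 == (o, d)) = false := by simpa using hf
      simp only [List.find?_cons, hbeq]
      cases hp : P t with
      | true =>
        have hne : t.1.1 ≠ o := fun ho' => hf (Prod.ext_iff.mpr ⟨ho', hP t hp⟩)
        simp only [List.filter_cons, hp, if_pos, List.map_cons, List.foldl_cons]
        rw [if_neg hne]
        exact ih hnd2 r
      | false =>
        have hfilter : List.filter P (t :: l) = List.filter P l := by
          simp [hp]
        rw [hfilter]
        exact ih hnd2 r

-- per-row, per-destination: B's distributed inserts equal A's row step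
theorem pv_per_cell (D : PySem.Dict (String × String) Int) (hD : D.keys.Nodup)
    (ks : List String) (o d : String) (ho : o ∈ ks) (hd : d ∈ ks) (r : PySem.Dict String Int) :
    (((D.items.filter (fun t => decide (t.2 ≠ 0 ∧ t.1.1 ≠ t.1.2 ∧ PySem.Set.contains (PySem.Set.ofList ks) t.1.1 = true ∧ PySem.Set.contains (PySem.Set.ofList ks) t.1.2 = true))).filter
        (fun t => t.1.2 == d)).map (fun t => (t.1.1, t.2))).foldl
      (fun r q => if q.1 = o then r.insert d q.2 else r) r
    = (if o ≠ d then
        match D.get? (o, d) with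
        | some distancia => if distancia ≠ 0 then r.insert d distancia else r
        | none => r
      else r) := by
  have hnd : (D.items.map Prod.fst).Nodup := hD
  rw [List.filter_filter]
  rw [pv_fold_unique D.items hnd o d _
      (fun t ht => by
        simp only [Bool.and_eq_true, beq_iff_eq] at ht
        exact ht.1) r]
  cases hfind : D.items.find? (fun t => t.1 == (o, d)) with
  | none =>
    have hget : D.get? (o, d) = none := by simp [PySem.Dict.get?, hfind]
    simp [hget]
  | some t =>
    have hget : D.get? (o, d) = some t.2 := by simp [PySem.Dict.get?, hfind]
    have hkey : t.1 = (o, d) := by simpa using List.find?_some hfind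
    obtain ⟨h11, h12⟩ := Prod.ext_iff.mp hkey
    rw [hget]
    by_cases hod : o = d
    · simp [h11, h12, hod]
    · by_cases ht2 : t.2 = 0
      · simp [h11, h12, hod, ht2]
      · simp [h11, h12, hod, ht2, ho, hd]

-- the two phase-1 computations (A: all-pairs rows; B: grouped edges + ordered sweep)
def pvPhase1A (coordenadas : List (String × Int)) (distancias : List (String × String × Int)) : PySem.Dict String (PySem.Dict String Int) :=
  let D := pvDictD distancias
  let lugares := (PySem.Dict.ofList coordenadas).keys
  lugares.foldl (fun g origen =>
      lugares.foldl (fun g destino =>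
        if origen ≠ destino then
          match D.get? (origen, destino) with
          | some distancia =>
              if distancia ≠ 0 then g.modify origen PySem.Dict.empty (fun row => row.insert destino distancia) else g
          | none => g
        else g) (g.insert origen PySem.Dict.empty)) PySem.Dict.empty

def pvPhase1B (coordenadas : List (String × Int)) (distancias : List (String × String × Int)) : PySem.Dict String (PySem.Dict String Int) :=
  let D := pvDictD distancias
  let lugares : PySem.Set String := PySem.Set.ofList (PySem.Dict.ofList coordenadas).keys
  let preds := D.items.foldl (fun p t =>
      if t.2 ≠ 0 ∧ t.1.1 ≠ t.1.2 ∧ PySem.Set.contains lugares t.1.1 = true ∧ PySem.Set.contains lugares t.1.2 = true then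
        p.modify t.1.2 [] (fun l => l ++ [(t.1.1, t.2)])
      else p) PySem.Dict.empty
  let grafo := (PySem.Dict.ofList coordenadas).keys.foldl
      (fun g origen => g.insert origen PySem.Dict.empty) PySem.Dict.empty
  (PySem.Dict.ofList coordenadas).keys.foldl (fun g destino =>
      (preds.getD destino []).foldl (fun g q =>
        g.modify q.1 PySem.Dict.empty (fun row => row.insert destino q.2)) g) grafo

theorem pv_phase1_eq (coordenadas : List (String × Int)) (distancias : List (String × String × Int)) :
    pvPhase1A coordenadas distancias = pvPhase1B coordenadas distancias := by
  have hks : (PySem.Dict.ofList coordenadas).keys.Nodup := PySem.Dict.nodup_keys_ofList _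
  have hD : (pvDictD distancias).keys.Nodup := PySem.Dict.nodup_keys_ofList _
  have hE : ∀ d' ∈ (PySem.Dict.ofList coordenadas).keys,
      ∀ q ∈ ((pvDictD distancias).items.foldl (fun p t =>
          if t.2 ≠ 0 ∧ t.1.1 ≠ t.1.2 ∧ PySem.Set.contains (PySem.Set.ofList (PySem.Dict.ofList coordenadas).keys) t.1.1 = true ∧ PySem.Set.contains (PySem.Set.ofList (PySem.Dict.ofList coordenadas).keys) t.1.2 = true then
            p.modify t.1.2 [] (fun l => l ++ [(t.1.1, t.2)])
          else p) PySem.Dict.empty).getD d' [], q.1 ∈ (PySem.Dict.ofList coordenadas).keys := by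
    intro d' _ q hq
    rw [pv_preds_getD] at hq
    obtain ⟨t, ht, rfl⟩ := List.mem_map.mp hq
    have ht1 := (List.mem_filter.mp (List.mem_filter.mp ht).1).2
    have hc := (of_decide_eq_true ht1).2.2.1
    have hmem : t.1.1 ∈ PySem.Set.ofList (PySem.Dict.ofList coordenadas).keys := by
      simpa [PySem.Set.contains] using hc
    exact (PySem.Set.mem_ofList _ _).mp hmem
  apply PySem.Dict.ext
  have eq1 := (congrArg PySem.Dict.items (pv_phase1A (pvDictD distancias) (PySem.Dict.ofList coordenadas).keys)).trans
    (pv_items_rows _ hks (pvRowA (pvDictD distancias) (PySem.Dict.ofList coordenadas).keys))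
  have eq2 := pv_sweep (PySem.Dict.ofList coordenadas).keys hks
    (fun destino => ((pvDictD distancias).items.foldl (fun p t =>
        if t.2 ≠ 0 ∧ t.1.1 ≠ t.1.2 ∧ PySem.Set.contains (PySem.Set.ofList (PySem.Dict.ofList coordenadas).keys) t.1.1 = true ∧ PySem.Set.contains (PySem.Set.ofList (PySem.Dict.ofList coordenadas).keys) t.1.2 = true then
          p.modify t.1.2 [] (fun l => l ++ [(t.1.1, t.2)])
        else p) PySem.Dict.empty).getD destino [])
    (PySem.Dict.ofList coordenadas).keys hE
    ((PySem.Dict.ofList coordenadas).keys.foldl (fun g origen => g.insert origen PySem.Dict.empty) PySem.Dict.empty)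
    (fun _ => PySem.Dict.empty)
    (pv_items_rows _ hks (fun _ => PySem.Dict.empty))
  have mid : (PySem.Dict.ofList coordenadas).keys.map
        (fun o => (o, pvRowA (pvDictD distancias) (PySem.Dict.ofList coordenadas).keys o))
      = (PySem.Dict.ofList coordenadas).keys.map (fun o => (o,
          (PySem.Dict.ofList coordenadas).keys.foldl (fun r destino =>
            (((pvDictD distancias).items.foldl (fun p t =>
                if t.2 ≠ 0 ∧ t.1.1 ≠ t.1.2 ∧ PySem.Set.contains (PySem.Set.ofList (PySem.Dict.ofList coordenadas).keys) t.1.1 = true ∧ PySem.Set.contains (PySem.Set.ofList (PySem.Dict.ofList coordenadas).keys) t.1.2 = true then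
                  p.modify t.1.2 [] (fun l => l ++ [(t.1.1, t.2)])
                else p) PySem.Dict.empty).getD destino []).foldl
              (fun r q => if q.1 = o then r.insert destino q.2 else r) r) PySem.Dict.empty)) := by
    apply List.map_congr_left
    intro o ho
    refine congrArg (Prod.mk o) ?_
    unfold pvRowA
    apply PySem.List.foldl_congr_mem
    intro r d' hd'
    rw [pv_preds_getD]
    exact (pv_per_cell (pvDictD distancias) hD (PySem.Dict.ofList coordenadas).keys o d' ho hd' r).symm
  exact (eq1.trans mid).trans eq2.symm

-- ===== VERDICT (by name: the statement is the Claim_ definition above) =====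
theorem construir_grafo_spec : Claim_equal_construir_grafo := by
  intro coordenadas distancias intermedios _ _
  unfold Spec_construir_grafo
  show (pvFase2 (pvDictD distancias) intermedios (pvPhase1A coordenadas distancias)).items.map
        (fun p => (p.1, p.2.items))
     = (pvFase2 (pvDictD distancias) intermedios (pvPhase1B coordenadas distancias)).items.map
        (fun p => (p.1, p.2.items))
  rw [pv_phase1_eq]
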